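-- pv_equiv track=rewrite | github.com/erizghozi/vigenere | Tugas Vigenere Laurence 10115023/freqAnalysis.py | indonesiaFreqMatchScore
-- ===== SOURCE A (Python) =====
-- ETAOIN = 'ANEIUMTKDSRLGPHBYOJWCFVZQX'
--
-- LETTERS = 'ABCDEFGHIJKLMNOPQRSTUVWXYZ'
--
-- def getLetterCount(message):
--     # Hitung banyak huruf muncul
--     letterCount = {'A': 0, 'B': 0, 'C': 0, 'D': 0, 'E': 0, 'F': 0, 'G': 0, 'H': 0, 'I': 0, 'J': 0, 'K': 0, 'L': 0, 'M': 0, 'N': 0, 'O': 0, 'P': 0, 'Q': 0, 'R': 0, 'S': 0, 'T': 0, 'U': 0, 'V': 0, 'W': 0, 'X': 0, 'Y': 0, 'Z': 0}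
--
--     for letter in message.upper():
--         if letter in LETTERS:
--             letterCount[letter] += 1
--
--     return letterCount
--
-- def getItemAtIndexZero(x):
--     return x[0]
--
-- def getFrequencyOrder(message):
--     letterToFreq = getLetterCount(message)
--
--
--     freqToLetter = {}
--     for letter in LETTERS:
--         if letterToFreq[letter] not in freqToLetter:
--             freqToLetter[letterToFreq[letter]] = [letter]
--         else:
--             freqToLetter[letterToFreq[letter]].append(letter)
--
--     for freq in freqToLetter:
--         freqToLetter[freq].sort(key=ETAOIN.find, reverse=True)
--         freqToLetter[freq] = ''.join(freqToLetter[freq])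
--
--     freqPairs = list(freqToLetter.items())
--     freqPairs.sort(key=getItemAtIndexZero, reverse=True)
--
--
--     freqOrder = []
--     for freqPair in freqPairs:
--         freqOrder.append(freqPair[1])
--
--     return ''.join(freqOrder)
--
-- def indonesiaFreqMatchScore(message):
--     # Kembali ke banyak huruf yang cocok
--     freqOrder = getFrequencyOrder(message)
--
--     matchScore = 0
--     # Cari berapa banyak 6 huruf paling cocok
--     for commonLetter in ETAOIN[:6]:
--         if commonLetter in freqOrder[:6]:
--             matchScore += 1
--     # Cari berapa banyak 6 huruf paling tidak cocok
--     for uncommonLetter in ETAOIN[-6:]: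
--         if uncommonLetter in freqOrder[-6:]:
--             matchScore += 1
--
--     return matchScore
-- ===== SOURCE B (Python) =====
-- ETAOIN = 'ANEIUMTKDSRLGPHBYOJWCFVZQX'
--
-- LETTERS = 'ABCDEFGHIJKLMNOPQRSTUVWXYZ'
--
-- def indonesiaFreqMatchScore(message):
--     # One direct sort of the 26 letters replaces A's bucket-dict + double sort.
--     up = [ch for ch in message.upper() if ch in LETTERS]
--     freqOrder = ''.join(sorted(LETTERS,
--                                key=lambda c: up.count(c) * 26 + ETAOIN.index(c),
--                                reverse=True))
--     return (sum(c in freqOrder[:6] for c in ETAOIN[:6])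
--             + sum(c in freqOrder[-6:] for c in ETAOIN[-6:]))
-- ===== Notes on version B (the rewrite author's own statement) =====
-- stated objective: simpler
-- what changed: Replaces A's count-to-letters bucket dict with its per-bucket sort plus bucket sort with one direct sort of the 26 letters by the combined key count*26 + ETAOIN-index (descending), and folds the two scoring loops into two sums.
import Mathlib
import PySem

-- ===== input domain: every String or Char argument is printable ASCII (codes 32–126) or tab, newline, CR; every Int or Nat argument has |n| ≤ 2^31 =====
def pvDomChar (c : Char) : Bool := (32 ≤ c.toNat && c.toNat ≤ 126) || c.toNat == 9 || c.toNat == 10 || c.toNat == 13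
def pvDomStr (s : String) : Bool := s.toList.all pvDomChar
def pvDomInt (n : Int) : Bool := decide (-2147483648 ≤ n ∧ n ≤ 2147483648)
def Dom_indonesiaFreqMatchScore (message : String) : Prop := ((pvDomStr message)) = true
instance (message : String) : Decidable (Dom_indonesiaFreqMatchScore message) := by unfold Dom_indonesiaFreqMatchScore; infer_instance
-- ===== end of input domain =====

-- B replaces A's count→letters bucket dict, per-bucket sort and bucket sort with ONE direct
-- sort of the 26 letters by the combined key count*26 + ETAOIN-index, descending (objective: simpler).

-- ===== PORT A =====
def pvEtaoin : List Char := "ANEIUMTKDSRLGPHBYOJWCFVZQX".toList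
def pvLetters : List Char := "ABCDEFGHIJKLMNOPQRSTUVWXYZ".toList

-- the literal letterCount dict of the Python
def pvInitCount : PySem.Dict Char Int :=
  PySem.Dict.ofList [('A',0),('B',0),('C',0),('D',0),('E',0),('F',0),('G',0),('H',0),('I',0),
    ('J',0),('K',0),('L',0),('M',0),('N',0),('O',0),('P',0),('Q',0),('R',0),('S',0),('T',0),
    ('U',0),('V',0),('W',0),('X',0),('Y',0),('Z',0)]

-- getLetterCount; `letterCount[letter] += 1` never misses (letter ∈ LETTERS, all 26 keys seeded),
-- so `modify letter 0 (· + 1)` is exact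
def pvGetLetterCount (message : String) : PySem.Dict Char Int :=
  (PySem.Chars.upper message.toList).foldl
    (fun d letter => if PySem.Chars.isIn [letter] pvLetters then d.modify letter 0 (· + 1) else d)
    pvInitCount

-- getFrequencyOrder; `freqToLetter[k].append(letter)` on a present key is `d[k] = d[k] + [letter]`;
-- `letterToFreq[letter]` never misses (all 26 letters are keys), so getD is exact;
-- strings are carried as List Char (PySem.Chars)
def pvGetFrequencyOrder (message : String) : List Char :=
  let letterToFreq := pvGetLetterCount message
  let freqToLetter : PySem.Dict Int (List Char) :=
    pvLetters.foldl (fun d letter =>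
      if d.contains (letterToFreq.getD letter 0) = false then
        d.insert (letterToFreq.getD letter 0) [letter]
      else
        d.insert (letterToFreq.getD letter 0) (d.getD (letterToFreq.getD letter 0) [] ++ [letter]))
      PySem.Dict.empty
  -- for freq in freqToLetter: sort the bucket by ETAOIN.find descending, join
  let freqToLetter2 : List (Int × List Char) :=
    freqToLetter.items.map (fun p => (p.1, PySem.List.sorted p.2 (fun c => PySem.Chars.find pvEtaoin [c]) true))
  let freqPairs := PySem.List.sorted freqToLetter2 (fun p => p.1) true
  freqPairs.foldl (fun acc p => acc ++ p.2) []

def indonesiaFreqMatchScore (message : String) : Int :=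
  let freqOrder := pvGetFrequencyOrder message
  let m1 := (PySem.List.slice pvEtaoin none (some 6)).foldl
    (fun matchScore commonLetter =>
      if PySem.Chars.isIn [commonLetter] (PySem.List.slice freqOrder none (some 6)) then
        matchScore + 1 else matchScore) 0
  (PySem.List.slice pvEtaoin (some (-6)) none).foldl
    (fun matchScore uncommonLetter =>
      if PySem.Chars.isIn [uncommonLetter] (PySem.List.slice freqOrder (some (-6)) none) then
        matchScore + 1 else matchScore) m1

-- ===== PORT B =====
-- ETAOIN.index(c) never raises for c ∈ LETTERS, so it is exactly ETAOIN.find(c)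
def indonesiaFreqMatchScore_alt (message : String) : Int :=
  let up := (PySem.Chars.upper message.toList).filter (fun ch => PySem.Chars.isIn [ch] pvLetters)
  let freqOrder := PySem.List.sorted pvLetters
    (fun c => (up.count c : Int) * 26 + PySem.Chars.find pvEtaoin [c]) true
  ((PySem.List.slice pvEtaoin none (some 6)).map
      (fun c => if PySem.Chars.isIn [c] (PySem.List.slice freqOrder none (some 6)) then (1 : Int) else 0)).sum
  + ((PySem.List.slice pvEtaoin (some (-6)) none).map
      (fun c => if PySem.Chars.isIn [c] (PySem.List.slice freqOrder (some (-6)) none) then (1 : Int) else 0)).sum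

-- ===== PRECONDITION & SPEC =====
def Spec_indonesiaFreqMatchScore (message : String) (out : Int) : Prop := out = indonesiaFreqMatchScore_alt message
instance (message : String) (out : Int) : Decidable (Spec_indonesiaFreqMatchScore message out) := by unfold Spec_indonesiaFreqMatchScore; infer_instance

-- ===== CLAIM (what is proved, stated in full; the proofs are below) =====
def Claim_equal_indonesiaFreqMatchScore : Prop := ∀ (message : String), Dom_indonesiaFreqMatchScore message → Spec_indonesiaFreqMatchScore message (indonesiaFreqMatchScore message)

-- ===== LEMMAS AND PROOFS =====

-- the filtered upper-cased letters of the message, and B's combined sort key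
def pvUp (message : String) : List Char :=
  (PySem.Chars.upper message.toList).filter (fun ch => PySem.Chars.isIn [ch] pvLetters)

def pvCnt (message : String) (c : Char) : Int := ((pvUp message).count c : Int)

def pvKey (message : String) (c : Char) : Int :=
  pvCnt message c * 26 + PySem.Chars.find pvEtaoin [c]

-- A's grouping loop, abstracted over the count function
def pvGroupLoop (g : Char → Int) (ls : List Char) : PySem.Dict Int (List Char) :=
  ls.foldl (fun d letter =>
    if d.contains (g letter) = false then
      d.insert (g letter) [letter]
    else
      d.insert (g letter) (d.getD (g letter) [] ++ [letter]))
    PySem.Dict.empty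

theorem pvDedup_append {α : Type} [BEq α] [LawfulBEq α] (xs : List α) (a : α) :
    PySem.List.dedup (xs ++ [a]) =
      PySem.List.dedup xs ++ (if a ∈ xs then [] else [a]) := by
  have h1 : PySem.List.dedup (xs ++ [a]) = PySem.Set.add (PySem.List.dedup xs) a := by
    show PySem.Set.ofList (xs ++ [a]) = _
    unfold PySem.Set.ofList
    rw [List.foldl_append]
    rfl
  rw [h1]
  have hc : PySem.Set.contains (PySem.List.dedup xs) a = decide (a ∈ xs) := by
    simp [PySem.Set.contains, List.contains_eq_mem]
  unfold PySem.Set.add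
  rw [hc]
  by_cases h : a ∈ xs <;> simp [h]

theorem pvSum_ite_nodup (l : List Int) (hl : l.Nodup) (v : Int) (n : Nat) :
    (l.map (fun f => if v == f then n else 0)).sum = if v ∈ l then n else 0 := by
  induction l with
  | nil => simp
  | cons x t ih =>
    simp only [List.nodup_cons] at hl
    rw [List.map_cons, List.sum_cons, ih hl.2]
    by_cases hvx : v = x
    · subst hvx
      simp [hl.1]
    · simp [hvx, beq_iff_eq]

theorem pvInit_items : pvInitCount.items = [('A',(0:Int)),('B',0),('C',0),('D',0),('E',0),('F',0),('G',0),('H',0),('I',0),('J',0),('K',0),('L',0),('M',0),('N',0),('O',0),('P',0),('Q',0),('R',0),('S',0),('T',0),('U',0),('V',0),('W',0),('X',0),('Y',0),('Z',0)] := by rfl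

theorem pvInit_getD (c : Char) : pvInitCount.getD c 0 = 0 := by
  rw [PySem.Dict.getD_eq_get?_getD]
  cases hg : pvInitCount.get? c with
  | none => rfl
  | some v =>
    have hm := PySem.Dict.mem_items_of_get?_eq_some pvInitCount hg
    rw [pvInit_items] at hm
    have hv : v = 0 := by
      simp only [List.mem_cons, List.not_mem_nil, or_false, Prod.mk.injEq] at hm
      rcases hm with h|h|h|h|h|h|h|h|h|h|h|h|h|h|h|h|h|h|h|h|h|h|h|h|h|h <;> exact h.2
    simp [hv]

theorem pvCnt_eq (message : String) (c : Char) :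
    (pvGetLetterCount message).getD c 0 = pvCnt message c := by
  unfold pvGetLetterCount pvCnt pvUp
  rw [PySem.List.foldl_if_eq_foldl_filter]
  rw [PySem.Dict.getD_foldl_modify_add_one]
  rw [pvInit_getD]
  simp

theorem pvGroup_items (g : Char → Int) (ls : List Char) :
    (pvGroupLoop g ls).items =
      (PySem.List.dedup (ls.map g)).map (fun f => (f, ls.filter (fun c => g c == f))) := by
  induction ls using List.reverseRecOn with
  | nil => rfl
  | append_singleton xs x ih =>
    have hkeys : (pvGroupLoop g xs).keys = PySem.List.dedup (xs.map g) := by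
      show (pvGroupLoop g xs).items.map Prod.fst = _
      rw [ih, List.map_map]
      have hid : (Prod.fst ∘ fun f => (f, List.filter (fun c => g c == f) xs)) = id := rfl
      rw [hid, List.map_id]
    have hnd : (pvGroupLoop g xs).keys.Nodup := hkeys ▸ PySem.List.nodup_dedup _
    have hcont : (pvGroupLoop g xs).contains (g x) = decide (g x ∈ xs.map g) := by
      rw [PySem.Dict.contains_eq_decide_mem_keys, hkeys]
      simp
    have hstep : pvGroupLoop g (xs ++ [x]) =
        (if (pvGroupLoop g xs).contains (g x) = false then
          (pvGroupLoop g xs).insert (g x) [x]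
        else
          (pvGroupLoop g xs).insert (g x) ((pvGroupLoop g xs).getD (g x) [] ++ [x])) := by
      unfold pvGroupLoop
      rw [List.foldl_append]
      rfl
    rw [hstep, List.map_append]
    simp only [List.map_cons, List.map_nil]
    rw [pvDedup_append]
    by_cases hmem : g x ∈ xs.map g
    · rw [hcont, if_neg (by simp [hmem]), if_pos hmem, List.append_nil]
      have hrow : (g x, xs.filter (fun c => g c == g x)) ∈ (pvGroupLoop g xs).items := by
        rw [ih]
        exact List.mem_map.mpr ⟨g x, by simp [hmem]⟩
      have hgetD := PySem.Dict.getD_of_mem_items (pvGroupLoop g xs) hrow hnd []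
      rw [PySem.Dict.items_insert_of_contains _ _ (by rw [hcont]; simp [hmem]), ih, hgetD,
        List.map_map]
      apply List.map_congr_left
      intro f hf
      by_cases hfx : f = g x
      · subst hfx
        simp [List.filter_append]
      · have : (f == g x) = false := by simp [hfx]
        simp only [Function.comp_apply, this, Bool.false_eq_true, if_false]
        have hx : (g x == f) = false := by simp [Ne.symm hfx]
        simp [List.filter_append, hx]
    · rw [hcont, if_pos (by simp [hmem]), if_neg hmem]
      rw [PySem.Dict.items_insert_of_not_contains _ _ (by rw [hcont]; simp [hmem]), ih,
        List.map_append]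
      congr 1
      · apply List.map_congr_left
        intro f hf
        have hf' : f ∈ xs.map g := (PySem.List.mem_dedup _ _).mp hf
        have hx : (g x == f) = false := by
          simp only [beq_eq_false_iff_ne, ne_eq]
          intro h; exact hmem (h ▸ hf')
        simp [List.filter_append, hx]
      · have hnilf : xs.filter (fun c => g c == g x) = [] := by
          rw [List.filter_eq_nil_iff]
          intro c hc hgc
          exact hmem (List.mem_map.mpr ⟨c, hc, by simpa using hgc⟩)
        simp [List.filter_append, hnilf]

theorem pvLetters_nodup : pvLetters.Nodup := by decide
set_option maxRecDepth 8000 in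
theorem pvFind_bounds_all : (pvLetters.map (fun c => PySem.Chars.find pvEtaoin [c])).all
    (fun k => decide (0 ≤ k ∧ k < 26)) = true := by decide

theorem pvFind_bounds : ∀ c ∈ pvLetters,
    0 ≤ PySem.Chars.find pvEtaoin [c] ∧ PySem.Chars.find pvEtaoin [c] < 26 := by
  intro c hc
  have h := List.all_eq_true.mp pvFind_bounds_all _ (List.mem_map.mpr ⟨c, hc, rfl⟩)
  simpa using h
set_option maxRecDepth 8000 in
theorem pvFind_map_nodup : (pvLetters.map (fun c => PySem.Chars.find pvEtaoin [c])).Nodup := by decide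

theorem pvFind_inj : ∀ a ∈ pvLetters, ∀ b ∈ pvLetters,
    PySem.Chars.find pvEtaoin [a] = PySem.Chars.find pvEtaoin [b] → a = b :=
  List.inj_on_of_nodup_map pvFind_map_nodup

theorem pvSorted_eq (g : Char → Int) :
    PySem.List.sorted pvLetters (fun c => g c * 26 + PySem.Chars.find pvEtaoin [c]) true
      = (PySem.List.sorted
          (((pvGroupLoop g pvLetters).items).map
            (fun p => (p.1, PySem.List.sorted p.2 (fun c => PySem.Chars.find pvEtaoin [c]) true)))
          (fun p => p.1) true).flatMap (fun p => p.2) := by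
  rw [pvGroup_items, List.map_map]
  apply PySem.List.sorted_rev_eq_of_perm_of_pairwise_gt
  · -- permutation with pvLetters
    rw [List.perm_iff_count]
    intro c
    rw [List.count_flatMap]
    have hperm := PySem.List.sorted_perm
      ((PySem.List.dedup (pvLetters.map g)).map
        ((fun p : Int × List Char => (p.1, PySem.List.sorted p.2 (fun c => PySem.Chars.find pvEtaoin [c]) true)) ∘
          fun f => (f, pvLetters.filter (fun c => g c == f))))
      (fun p => p.1) true
    rw [(hperm.map (List.count c ∘ fun p => p.2)).sum_eq, List.map_map]
    have h2 : (PySem.List.dedup (pvLetters.map g)).map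
        ((List.count c ∘ fun p : Int × List Char => p.2) ∘
          ((fun p : Int × List Char => (p.1, PySem.List.sorted p.2 (fun c => PySem.Chars.find pvEtaoin [c]) true)) ∘
            fun f => (f, pvLetters.filter (fun c => g c == f))))
        = (PySem.List.dedup (pvLetters.map g)).map
            (fun f => if g c == f then pvLetters.count c else 0) := by
      apply List.map_congr_left
      intro f _
      show List.count c (PySem.List.sorted (pvLetters.filter (fun x => g x == f)) _ true) = _
      rw [(PySem.List.sorted_perm _ _ _).count_eq]
      by_cases hgc : (g c == f) = true
      · rw [if_pos hgc, List.count_filter (p := fun x => g x == f) (a := c) hgc]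
      · rw [if_neg (by simpa using hgc), List.count_eq_zero.mpr]
        intro hmemf
        exact hgc (List.mem_filter.mp hmemf).2
    rw [h2, pvSum_ite_nodup _ (PySem.List.nodup_dedup _) (g c)]
    by_cases hc : c ∈ pvLetters
    · rw [if_pos ((PySem.List.mem_dedup _ _).mpr (List.mem_map.mpr ⟨c, hc, rfl⟩))]
    · rw [List.count_eq_zero.mpr hc]
      simp
  · -- pairwise strictly descending combined key
    have hperm := PySem.List.sorted_perm
      ((PySem.List.dedup (pvLetters.map g)).map
        ((fun p : Int × List Char => (p.1, PySem.List.sorted p.2 (fun c => PySem.Chars.find pvEtaoin [c]) true)) ∘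
          fun f => (f, pvLetters.filter (fun c => g c == f))))
      (fun p => p.1) true
    have hmemS : ∀ p ∈ PySem.List.sorted
        ((PySem.List.dedup (pvLetters.map g)).map
          ((fun p : Int × List Char => (p.1, PySem.List.sorted p.2 (fun c => PySem.Chars.find pvEtaoin [c]) true)) ∘
            fun f => (f, pvLetters.filter (fun c => g c == f))))
        (fun p => p.1) true,
        ∃ f, p = (f, PySem.List.sorted (pvLetters.filter (fun c => g c == f)) (fun c => PySem.Chars.find pvEtaoin [c]) true) := by
      intro p hp
      have hp' := (PySem.List.mem_sorted _ _ _ _).mp hp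
      obtain ⟨f, _, rfl⟩ := List.mem_map.mp hp'
      exact ⟨f, rfl⟩
    have helt : ∀ p ∈ PySem.List.sorted
        ((PySem.List.dedup (pvLetters.map g)).map
          ((fun p : Int × List Char => (p.1, PySem.List.sorted p.2 (fun c => PySem.Chars.find pvEtaoin [c]) true)) ∘
            fun f => (f, pvLetters.filter (fun c => g c == f))))
        (fun p => p.1) true,
        ∀ x ∈ p.2, x ∈ pvLetters ∧ g x = p.1 := by
      intro p hp x hx
      obtain ⟨f, rfl⟩ := hmemS p hp
      have hx' := (PySem.List.mem_sorted _ _ _ _).mp hx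
      have hm := List.mem_filter.mp hx'
      exact ⟨hm.1, by simpa using hm.2⟩
    have hfstnd : (PySem.List.sorted
        ((PySem.List.dedup (pvLetters.map g)).map
          ((fun p : Int × List Char => (p.1, PySem.List.sorted p.2 (fun c => PySem.Chars.find pvEtaoin [c]) true)) ∘
            fun f => (f, pvLetters.filter (fun c => g c == f))))
        (fun p => p.1) true).Pairwise (fun p q => p.1 ≠ q.1) := by
      have h1 := hperm.map (Prod.fst)
      have h2 : ((PySem.List.dedup (pvLetters.map g)).map
          ((fun p : Int × List Char => (p.1, PySem.List.sorted p.2 (fun c => PySem.Chars.find pvEtaoin [c]) true)) ∘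
            fun f => (f, pvLetters.filter (fun c => g c == f)))).map Prod.fst
          = PySem.List.dedup (pvLetters.map g) := by
        rw [List.map_map]
        exact List.map_id _
      rw [h2] at h1
      have hnd := h1.nodup_iff.mpr (PySem.List.nodup_dedup _)
      exact List.pairwise_map.mp hnd
    have hdesc := (PySem.List.sorted_pairwise_rev
      ((PySem.List.dedup (pvLetters.map g)).map
        ((fun p : Int × List Char => (p.1, PySem.List.sorted p.2 (fun c => PySem.Chars.find pvEtaoin [c]) true)) ∘
          fun f => (f, pvLetters.filter (fun c => g c == f))))
      (fun p => p.1)).and hfstnd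
    have hdesc' := hdesc.imp (fun h => lt_of_le_of_ne h.1 h.2.symm)
    rw [List.flatMap_def, List.pairwise_flatten]
    constructor
    · intro l hl
      obtain ⟨p, hp, rfl⟩ := List.mem_map.mp hl
      have helt' := helt p hp
      obtain ⟨f, rfl⟩ := hmemS p hp
      have hnod : (PySem.List.sorted (pvLetters.filter (fun c => g c == f))
          (fun c => PySem.Chars.find pvEtaoin [c]) true).Nodup :=
        ((PySem.List.sorted_perm _ _ _).nodup_iff).mpr (pvLetters_nodup.filter _)
      refine List.Pairwise.imp_of_mem ?_
        ((PySem.List.sorted_pairwise_rev (pvLetters.filter (fun c => g c == f))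
          (fun c => PySem.Chars.find pvEtaoin [c])).and hnod)
      intro a b ha hb hab
      have hai := helt' a ha
      have hbi := helt' b hb
      have hne : PySem.Chars.find pvEtaoin [b] ≠ PySem.Chars.find pvEtaoin [a] := by
        intro heq
        exact hab.2 (pvFind_inj b hbi.1 a hai.1 heq).symm
      have hlt := lt_of_le_of_ne hab.1 hne
      have hga := hai.2
      have hgb := hbi.2
      simp only at hga hgb
      omega
    · rw [List.pairwise_map]
      refine List.Pairwise.imp_of_mem ?_ hdesc'
      intro p q hp hq hlt x hx y hy
      have hxp := helt p hp x hx
      have hyq := helt q hq y hy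
      have hbx := pvFind_bounds x hxp.1
      have hby := pvFind_bounds y hyq.1
      have h1 := hxp.2
      have h2 := hyq.2
      omega

theorem pvFreqOrder_eq (message : String) :
    pvGetFrequencyOrder message = PySem.List.sorted pvLetters (pvKey message) true := by
  unfold pvGetFrequencyOrder
  simp only [pvCnt_eq]
  rw [PySem.List.foldl_append_eq_flatMap, List.nil_append]
  exact (pvSorted_eq (pvCnt message)).symm

-- ===== VERDICT (by name: the statement is the Claim_ definition above) =====
theorem indonesiaFreqMatchScore_spec : Claim_equal_indonesiaFreqMatchScore := by
  unfold Claim_equal_indonesiaFreqMatchScore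
  intro message _
  unfold Spec_indonesiaFreqMatchScore
  simp only [indonesiaFreqMatchScore, indonesiaFreqMatchScore_alt]
  rw [pvFreqOrder_eq]
  have hk : (fun c => (((PySem.Chars.upper message.toList).filter
        (fun ch => PySem.Chars.isIn [ch] pvLetters)).count c : Int) * 26
        + PySem.Chars.find pvEtaoin [c]) = pvKey message := rfl
  rw [hk]
  rw [PySem.List.foldl_if_add_one, PySem.List.foldl_if_add_one,
    PySem.List.sum_map_ite_one_zero, PySem.List.sum_map_ite_one_zero]
  omega
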